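-- pv_equiv track=rewrite | github.com/WillemWissing/Python-general | tictactoe.py | checkstalemate
-- ===== SOURCE A (Python) =====
-- def checkstalemate(positions):
--     stalemate = True
--     for i in range(1,10):
--         for j in positions:
--             if str(i) == j:
--                 stalemate = False
--                 return stalemate
--     return stalemate
-- ===== SOURCE B (Python) =====
-- def checkstalemate(positions):
--     # An element marks a move iff it is a single character in the range '1'..'9';
--     # test that structurally (length + character range) instead of comparing
--     # against generated digit strings.
--     for j in positions:
--         if len(j) == 1 and '1' <= j[0] <= '9':
--             return False
--     return True
-- ===== Notes on version B (the rewrite author's own statement) =====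
-- stated objective: faster
-- what changed: A scans positions once per digit 1-9 comparing each element to str(i); B makes a single pass and classifies each element structurally as a length-1 string whose character lies in the range '1'..'9', never enumerating or generating the digit strings.
import Mathlib
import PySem

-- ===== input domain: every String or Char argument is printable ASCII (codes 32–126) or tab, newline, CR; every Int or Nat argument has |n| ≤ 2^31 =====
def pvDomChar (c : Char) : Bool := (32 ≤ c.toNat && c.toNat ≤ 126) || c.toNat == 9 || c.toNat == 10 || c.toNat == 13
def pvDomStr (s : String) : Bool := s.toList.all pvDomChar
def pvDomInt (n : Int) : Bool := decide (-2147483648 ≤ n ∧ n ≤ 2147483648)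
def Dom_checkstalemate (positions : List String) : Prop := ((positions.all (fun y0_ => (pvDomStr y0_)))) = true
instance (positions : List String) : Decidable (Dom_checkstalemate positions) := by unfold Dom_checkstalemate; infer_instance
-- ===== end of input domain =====

-- B replaces A's nine passes comparing each element to str(i) with one pass that
-- classifies each element structurally (length-1 string, character in '1'..'9').

-- ===== PORT A =====
-- inner loop: 'for j in positions: if str(i) == j: …return False' — true iff a match is found
def checkstalemateInner (i : Int) (ps : List String) : Bool :=
  match ps with
  | [] => false
  | j :: rest => if PySem.Int.toStr i == j then true else checkstalemateInner i rest

-- outer loop over range(1,10): returns the final 'stalemate' flag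
def checkstalemateOuter (is : List Int) (ps : List String) : Bool :=
  match is with
  | [] => true
  | i :: rest => if checkstalemateInner i ps then false else checkstalemateOuter rest ps

def checkstalemate (positions : List String) : Bool :=
  checkstalemateOuter (PySem.List.pyRange 1 10 1) positions

-- ===== PORT B =====
-- 'len(j) == 1 and '1' <= j[0] <= '9'': matching on j.toList gives exactly the
-- length-1 test with its single character c, then the range test on c.
def checkstalemateHit (j : String) : Bool :=
  match j.toList with
  | [c] => decide ('1' ≤ c ∧ c ≤ '9')
  | _ => false

def checkstalemate_alt (positions : List String) : Bool :=
  match positions with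
  | [] => true
  | j :: rest => if checkstalemateHit j then false else checkstalemate_alt rest

-- ===== PRECONDITION & SPEC =====
def Spec_checkstalemate (positions : List String) (out : Bool) : Prop := out = checkstalemate_alt positions
instance (positions : List String) (out : Bool) : Decidable (Spec_checkstalemate positions out) := by unfold Spec_checkstalemate; infer_instance

-- ===== CLAIM (what is proved, stated in full; the proofs are below) =====
def Claim_equal_checkstalemate : Prop := ∀ (positions : List String), Dom_checkstalemate positions → Spec_checkstalemate positions (checkstalemate positions)

-- ===== LEMMAS AND PROOFS =====
theorem inner_eq (i : Int) (ps : List String) :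
    checkstalemateInner i ps = ps.any (fun j => PySem.Int.toStr i == j) := by
  induction ps with
  | nil => rfl
  | cons j rest ih =>
      simp only [checkstalemateInner, List.any_cons, ih]
      by_cases h : PySem.Int.toStr i == j <;> simp [h]

theorem outer_eq (is : List Int) (ps : List String) :
    checkstalemateOuter is ps = !(is.any (fun i => checkstalemateInner i ps)) := by
  induction is with
  | nil => rfl
  | cons i rest ih =>
      simp only [checkstalemateOuter, List.any_cons, ih]
      by_cases h : checkstalemateInner i ps <;> simp [h]

theorem alt_eq (ps : List String) :
    checkstalemate_alt ps = !(ps.any checkstalemateHit) := by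
  induction ps with
  | nil => rfl
  | cons j rest ih =>
      simp only [checkstalemate_alt, List.any_cons, ih]
      by_cases h : checkstalemateHit j <;> simp [h]

theorem any_or_distrib {α : Type} (ps : List α) (f g : α → Bool) :
    ps.any (fun j => f j || g j) = (ps.any f || ps.any g) := by
  induction ps with
  | nil => rfl
  | cons a rest ih =>
      simp only [List.any_cons, ih]
      cases f a <;> cases g a <;> simp

theorem any_any_comm {α β : Type} (l : List α) (ps : List β) (f : α → β → Bool) :
    l.any (fun i => ps.any (f i)) = ps.any (fun j => l.any (fun i => f i j)) := by
  induction l with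
  | nil => simp
  | cons a rest ih =>
      simp only [List.any_cons, ih]
      rw [any_or_distrib]

-- a string equals one of "1"…"9" iff its char list is a single char in '1'..'9'
theorem digits_key (j : String) :
    (([1, 2, 3, 4, 5, 6, 7, 8, 9] : List Int).any (fun i => PySem.Int.toStr i == j))
      = checkstalemateHit j := by
  show ((["1", "2", "3", "4", "5", "6", "7", "8", "9"] : List String).any (fun s => s == j)) = _
  have key : ∀ s : String, (s == j) = (s.toList == j.toList) := by
    intro s
    rw [Bool.eq_iff_iff, beq_iff_eq, beq_iff_eq]
    constructor
    · intro h; rw [h]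
    · intro h; exact String.toList_inj.mp h
  simp only [key]
  unfold checkstalemateHit
  match h : j.toList with
  | [] => simp
  | [c] =>
      simp only [List.any_cons, List.any_nil, Bool.or_false]
      rw [Bool.eq_iff_iff]
      simp only [Bool.or_eq_true, beq_iff_eq, decide_eq_true_iff]
      constructor
      · rintro (h1|h1|h1|h1|h1|h1|h1|h1|h1) <;>
          (injection h1 with hc _; subst hc; exact ⟨by decide, by decide⟩)
      · rintro ⟨hl, hr⟩
        have hl' : ('1' : Char).toNat ≤ c.toNat := by
          simpa [Char.le_def, UInt32.le_iff_toNat_le] using hl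
        have hr' : c.toNat ≤ ('9' : Char).toNat := by
          simpa [Char.le_def, UInt32.le_iff_toNat_le] using hr
        have hv : c.toNat = 49 ∨ c.toNat = 50 ∨ c.toNat = 51 ∨ c.toNat = 52 ∨
            c.toNat = 53 ∨ c.toNat = 54 ∨ c.toNat = 55 ∨ c.toNat = 56 ∨ c.toNat = 57 := by
          have e1 : ('1' : Char).toNat = 49 := by decide
          have e9 : ('9' : Char).toNat = 57 := by decide
          rw [e1] at hl'; rw [e9] at hr'
          omega
        have inj : ∀ d : Char, c.toNat = d.toNat → c = d := by
          intro d hd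
          exact Char.ext (UInt32.toNat_inj.mp hd)
        rcases hv with h1|h1|h1|h1|h1|h1|h1|h1|h1
        · exact Or.inl (by rw [inj '1' h1]; decide)
        · exact Or.inr (Or.inl (by rw [inj '2' h1]; decide))
        · exact Or.inr (Or.inr (Or.inl (by rw [inj '3' h1]; decide)))
        · exact Or.inr (Or.inr (Or.inr (Or.inl (by rw [inj '4' h1]; decide))))
        · exact Or.inr (Or.inr (Or.inr (Or.inr (Or.inl (by rw [inj '5' h1]; decide)))))
        · exact Or.inr (Or.inr (Or.inr (Or.inr (Or.inr (Or.inl (by rw [inj '6' h1]; decide))))))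
        · exact Or.inr (Or.inr (Or.inr (Or.inr (Or.inr (Or.inr (Or.inl (by rw [inj '7' h1]; decide)))))))
        · exact Or.inr (Or.inr (Or.inr (Or.inr (Or.inr (Or.inr (Or.inr (Or.inl (by rw [inj '8' h1]; decide))))))))
        · exact Or.inr (Or.inr (Or.inr (Or.inr (Or.inr (Or.inr (Or.inr (Or.inr (by rw [inj '9' h1]; decide))))))))
  | c :: d :: t => simp

theorem pyRange_eval : PySem.List.pyRange 1 10 1 = [1, 2, 3, 4, 5, 6, 7, 8, 9] := by decide

-- ===== VERDICT (by name: the statement is the Claim_ definition above) =====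
theorem checkstalemate_spec : Claim_equal_checkstalemate := by
  intro positions _
  unfold Spec_checkstalemate checkstalemate
  rw [outer_eq, pyRange_eval, alt_eq]
  simp only [inner_eq, any_any_comm, digits_key]
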